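-- pv_equiv track=rewrite | github.com/ktam512/leetcode | Leetcode_Medium/_36. Valid Sudoku/Solution.py | is_valid_unit
-- ===== SOURCE A (Python) =====
-- def is_valid_unit(unit):
--     # Check if all elements in the unit are digits from 1 to 9
--     digits = set()
--     for cell in unit:
--         if cell != '.':
--             if cell in digits:
--                 return False
--             digits.add(cell)
--     return True
-- ===== SOURCE B (Python) =====
-- def is_valid_unit(unit):
--     cells = sorted(c for c in unit if c != '.')
--     return all(a != b for a, b in zip(cells, cells[1:]))
-- ===== Notes on version B (the rewrite author's own statement) =====
-- stated objective: alternative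
-- what changed: Replaces A's hash-set duplicate detection with early return by sort-then-scan: sort the non-'.' cells and check that no two adjacent cells are equal.
import Mathlib
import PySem

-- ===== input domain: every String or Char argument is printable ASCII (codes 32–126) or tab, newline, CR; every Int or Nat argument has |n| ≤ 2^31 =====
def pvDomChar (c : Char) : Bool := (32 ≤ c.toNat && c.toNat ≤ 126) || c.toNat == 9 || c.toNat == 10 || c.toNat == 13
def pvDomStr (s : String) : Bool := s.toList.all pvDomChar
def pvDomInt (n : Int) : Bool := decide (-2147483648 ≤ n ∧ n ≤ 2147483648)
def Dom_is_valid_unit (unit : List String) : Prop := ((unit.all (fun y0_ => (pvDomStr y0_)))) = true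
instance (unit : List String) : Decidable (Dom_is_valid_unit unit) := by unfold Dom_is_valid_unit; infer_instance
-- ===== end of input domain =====

-- B replaces A's hash-set duplicate detection (early return on first repeat) by a
-- sort-then-scan: sort the non-'.' cells and check no two ADJACENT cells are equal.
-- Objective: alternative (different algorithm, same result).

-- ===== PORT A =====
-- the 'for cell in unit' loop with early 'return False' and the growing set 'digits'
def loopA : List String → PySem.Set String → Bool
  | [], _ => true
  | cell :: rest, digits =>
    if cell ≠ "." then
      if PySem.Set.contains digits cell then false
      else loopA rest (PySem.Set.add digits cell)
    else loopA rest digits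

def is_valid_unit (unit : List String) : Bool := loopA unit PySem.Set.empty

-- ===== PORT B =====
-- all(a != b for a, b in zip(cells, cells[1:])): adjacent pairs of the sorted list
def noAdjEq : List String → Bool
  | a :: b :: rest => a != b && noAdjEq (b :: rest)
  | _ => true

def is_valid_unit_alt (unit : List String) : Bool :=
  let cells := PySem.List.sorted (unit.filter (fun c => c ≠ ".")) (fun x => x) false
  noAdjEq cells

-- ===== PRECONDITION & SPEC =====
def Spec_is_valid_unit (unit : List String) (out : Bool) : Prop := out = is_valid_unit_alt unit
instance (unit : List String) (out : Bool) : Decidable (Spec_is_valid_unit unit out) := by unfold Spec_is_valid_unit; infer_instance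

-- ===== CLAIM =====
def Claim_equal_is_valid_unit : Prop := ∀ (unit : List String), Dom_is_valid_unit unit → Spec_is_valid_unit unit (is_valid_unit unit)

-- ===== LEMMAS AND PROOFS =====

-- A's loop, started from a duplicate-free set s, decides Nodup of s plus the remaining non-'.' cells
lemma loopA_char (l : List String) : ∀ s : PySem.Set String, s.Nodup →
    loopA l s = decide ((s ++ l.filter (fun c => c ≠ ".")).Nodup) := by
  induction l with
  | nil => intro s hs; simp [loopA, hs]
  | cons c rest ih =>
    intro s hs
    by_cases hc : c = "."
    · simp [loopA, hc, ih s hs]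
    · by_cases hm : c ∈ s
      · simp only [loopA, hc, ite_not]
        have hcon : PySem.Set.contains s c = true := (PySem.Set.contains_iff s c).mpr hm
        rw [hcon]
        simp [hc, List.nodup_append]
        exact fun _ _ _ => ⟨c, hm, fun h => absurd rfl h⟩
      · have hcon : PySem.Set.contains s c = false := by
          rw [Bool.eq_false_iff]; intro h; exact hm ((PySem.Set.contains_iff s c).mp h)
        have hnd : (PySem.Set.add s c).Nodup := PySem.Set.nodup_add s c hs
        simp only [loopA, hcon]
        rw [PySem.Set.add_of_not_mem hm] at hnd ⊢
        rw [ih _ hnd]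
        simp [hc, List.append_assoc]

-- on a ≤-sorted list, no adjacent pair equal is exactly Nodup
lemma noAdjEq_char : ∀ l : List String, l.Pairwise (· ≤ ·) → noAdjEq l = decide l.Nodup := by
  intro l
  induction l with
  | nil => intro _; simp [noAdjEq]
  | cons a t ih =>
    intro hp
    cases t with
    | nil => simp [noAdjEq]
    | cons b rest =>
      have hab : a ≤ b := (List.pairwise_cons.mp hp).1 b (by simp)
      have hale : ∀ x ∈ b :: rest, a ≤ x := (List.pairwise_cons.mp hp).1
      have hpt : (b :: rest).Pairwise (· ≤ ·) := (List.pairwise_cons.mp hp).2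
      by_cases heq : a = b
      · subst heq
        simp [noAdjEq, List.nodup_cons]
      · rw [show noAdjEq (a :: b :: rest) = ((a != b) && noAdjEq (b :: rest)) from rfl,
            ih hpt]
        have hnm : a ∉ b :: rest := by
          intro hmem
          rcases List.mem_cons.mp hmem with h | h
          · exact heq h
          · have hba : b ≤ a := (List.pairwise_cons.mp hpt).1 a h
            exact heq (le_antisymm (hale b (by simp)) hba)
        simp [List.nodup_cons, heq, hnm]

-- ===== VERDICT =====
theorem is_valid_unit_spec : Claim_equal_is_valid_unit := by
  intro unit _
  show is_valid_unit unit = is_valid_unit_alt unit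
  unfold is_valid_unit is_valid_unit_alt
  rw [loopA_char unit PySem.Set.empty List.nodup_nil]
  simp only [PySem.Set.empty, List.nil_append]
  set f := unit.filter (fun c => c ≠ ".") with hf
  have hpw : (PySem.List.sorted f (fun x => x) false).Pairwise (· ≤ ·) :=
    PySem.List.sorted_pairwise f (fun x => x)
  rw [noAdjEq_char _ hpw]
  have hperm : (PySem.List.sorted f (fun x => x) false).Perm f :=
    PySem.List.sorted_perm f (fun x => x) false
  simp [hperm.nodup_iff]
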